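-- pv_equiv track=rewrite | github.com/eliottcassidy2000/math | 04-computation/p17_test.py | ham_count_dp
-- ===== SOURCE A (Python) =====
-- from collections import defaultdict
--
-- def ham_count_dp(n, S):
--     """Held-Karp DP for Hamiltonian path count."""
--     S_set = set(S)
--     adj = [0] * n  # bitmask adjacency
--     for i in range(n):
--         for j in range(n):
--             if i != j and (j - i) % n in S_set:
--                 adj[i] |= (1 << j)
--
--     full_mask = (1 << n) - 1
--     # Use dict for sparse DP
--     dp = defaultdict(int)
--     for v in range(n):
--         dp[(1 << v, v)] = 1
--
--     for mask in range(1, 1 << n):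
--         popcount = bin(mask).count('1')
--         if popcount >= n:
--             continue
--         for v in range(n):
--             if not (mask & (1 << v)):
--                 continue
--             cnt = dp.get((mask, v), 0)
--             if cnt == 0:
--                 continue
--             # Neighbors of v not in mask
--             candidates = adj[v] & ~mask
--             w = 0
--             while candidates:
--                 if candidates & 1:
--                     dp[(mask | (1 << w), w)] += cnt
--                 candidates >>= 1
--                 w += 1
--
--     return sum(dp.get((full_mask, v), 0) for v in range(n))
-- ===== SOURCE B (Python) =====
-- def ham_count_dp(n, S):
--     """Hamiltonian path count: memoized top-down pull recursion over subsets."""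
--     S_set = set(S)
--     memo = {}
--
--     def count(mask, v):
--         # number of paths covering exactly `mask`, ending at v
--         if mask == (1 << v):
--             return 1
--         key = (mask, v)
--         if key in memo:
--             return memo[key]
--         rest = mask ^ (1 << v)
--         total = 0
--         for u in range(n):
--             if (rest >> u) & 1 and (v - u) % n in S_set:
--                 total += count(rest, u)
--         memo[key] = total
--         return total
--
--     full = (1 << n) - 1
--     return sum(count(full, v) for v in range(n))
-- ===== Notes on version B (the rewrite author's own statement) =====
-- stated objective: alternative
-- what changed: A's forward 'push' Held-Karp tabulation that sweeps every mask in range(1, 1<<n) and scatters dp values to supersets is replaced by a memoized top-down 'pull' recursion count(mask, v) = sum of count(mask\{v}, u) over in-neighbours u in mask, evaluated from the full mask, so only states reachable backward from the full mask are ever computed; the adjacency bitmask table is dropped in favour of a direct membership test.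
import Mathlib
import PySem

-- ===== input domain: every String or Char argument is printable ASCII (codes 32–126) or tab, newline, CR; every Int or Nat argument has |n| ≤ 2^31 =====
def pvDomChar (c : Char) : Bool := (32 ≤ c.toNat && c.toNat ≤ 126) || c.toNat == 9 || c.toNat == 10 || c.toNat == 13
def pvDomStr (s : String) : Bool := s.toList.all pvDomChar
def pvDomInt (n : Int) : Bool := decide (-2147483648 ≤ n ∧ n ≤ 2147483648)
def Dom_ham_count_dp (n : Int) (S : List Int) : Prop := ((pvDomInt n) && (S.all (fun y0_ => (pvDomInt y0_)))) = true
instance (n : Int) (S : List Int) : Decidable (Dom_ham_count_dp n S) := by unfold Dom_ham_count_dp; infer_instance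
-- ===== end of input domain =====

-- B replaces A's forward 'push' Held–Karp tabulation over all 2^n masks by a memoized
-- top-down 'pull' recursion on subsets (objective: alternative decomposition, same asymptotics).

-- ===== PORT A =====
-- Under Pre_ (0 ≤ n) every integer A manipulates as an index, mask or adjacency row is
-- nonnegative, so those values are carried as Nat (the same numbers Python computes).

-- adjacency row i: for j in range(n): if i != j and (j - i) % n in S_set: adj[i] |= (1 << j)
def hamAdjRow (nn : Nat) (n : Int) (sset : PySem.Set Int) (i : Nat) : Nat :=
  (List.range nn).foldl
    (fun a j => if i ≠ j ∧ sset.contains (PySem.Int.mod ((j : Int) - (i : Int)) n) = true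
                then a ||| (1 <<< j) else a) 0

-- the inner 'while candidates: if candidates & 1: dp[(mask | (1 << w), w)] += cnt; candidates >>= 1; w += 1'
-- (candidates is nonnegative in A, so the Nat recursion on candidates is exact;
--  defaultdict 'dp[k] += cnt' = insert k (getD k 0 + cnt))
def hamPush (dp : PySem.Dict (Nat × Nat) Int) (cnt : Int) (mask : Nat) (cand : Nat) (w : Nat) :
    PySem.Dict (Nat × Nat) Int :=
  if h : cand = 0 then dp
  else
    let dp' := if cand &&& 1 = 1
               then dp.insert (mask ||| (1 <<< w), w) (dp.getD (mask ||| (1 <<< w), w) 0 + cnt)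
               else dp
    hamPush dp' cnt mask (cand >>> 1) (w + 1)
  termination_by cand
  decreasing_by
    have : cand >>> 1 = cand / 2 := Nat.shiftRight_one cand
    omega

-- body of 'for mask in range(1, 1 << n)'
def hamStep (nn : Nat) (n : Int) (adj : List Nat) (dp : PySem.Dict (Nat × Nat) Int) (mask : Nat) :
    PySem.Dict (Nat × Nat) Int :=
  if n ≤ (PySem.Int.bitCount (mask : Int) : Int) then dp     -- popcount >= n: continue
  else
    (List.range nn).foldl
      (fun dp v =>
        if mask &&& (1 <<< v) = 0 then dp                    -- not (mask & (1 << v)): continue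
        else
          let cnt := dp.getD (mask, v) 0
          if cnt = 0 then dp
          else hamPush dp cnt mask (Nat.ldiff (adj.getD v 0) mask) 0) dp
      -- NOTE w starts at 0

def ham_count_dp (n : Int) (S : List Int) : Int :=
  let nn := n.toNat
  let sset := PySem.Set.ofList S
  let adj : List Nat := (List.range nn).map (hamAdjRow nn n sset)
  let full : Nat := (1 <<< nn) - 1
  let dp0 : PySem.Dict (Nat × Nat) Int :=
    (List.range nn).foldl (fun d v => d.insert (1 <<< v, v) 1) PySem.Dict.empty
  let dp := (List.range' 1 (2 ^ nn - 1)).foldl (hamStep nn n adj) dp0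
  ((List.range nn).map (fun v => dp.getD (full, v) 0)).sum

-- ===== PORT B =====
-- termination helper for the pull recursion (cited in decreasing_by)
theorem hamXorLt (m v : Nat) (h : m.testBit v = true) : m ^^^ (1 <<< v) < m := by
  have hsl : (1 : Nat) <<< v = 2 ^ v := by simp [Nat.shiftLeft_eq]
  rw [hsl]
  apply Nat.lt_of_testBit v
  · simp [Nat.testBit_xor, h, Nat.testBit_two_pow]
  · exact h
  · intro j hj
    simp [Nat.testBit_xor, Nat.testBit_two_pow, Nat.ne_of_lt hj]

mutual
-- def count(mask, v): memoized pull recursion; the 'if hv' test is a totality guard only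
-- (B always calls count with bit v set in mask)
def hamCountB (nn : Nat) (n : Int) (sset : PySem.Set Int)
    (memo : PySem.Dict (Nat × Nat) Int) (mask v : Nat) :
    Int × PySem.Dict (Nat × Nat) Int :=
  if mask = 1 <<< v then (1, memo)
  else
    match memo.get? (mask, v) with
    | some t => (t, memo)
    | none =>
      if hv : mask.testBit v = true then
        let rest := mask ^^^ (1 <<< v)
        let r := hamCountBList nn n sset memo rest v (List.range nn) 0
        (r.1, r.2.insert (mask, v) r.1)
      else (0, memo)
  termination_by (2 * mask + 1, 0)
  decreasing_by
    have := hamXorLt mask v hv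
    simp [Prod.lex_def]; omega

-- 'for u in range(n): if (rest >> u) & 1 and (v - u) % n in S_set: total += count(rest, u)'
def hamCountBList (nn : Nat) (n : Int) (sset : PySem.Set Int)
    (memo : PySem.Dict (Nat × Nat) Int) (rest v : Nat) (us : List Nat) (acc : Int) :
    Int × PySem.Dict (Nat × Nat) Int :=
  match us with
  | [] => (acc, memo)
  | u :: us' =>
    if (rest >>> u) &&& 1 = 1 ∧ sset.contains (PySem.Int.mod ((v : Int) - (u : Int)) n) = true then
      let r := hamCountB nn n sset memo rest u
      hamCountBList nn n sset r.2 rest v us' (acc + r.1)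
    else hamCountBList nn n sset memo rest v us' acc
  termination_by (2 * rest + 2, us.length)
  decreasing_by
    · simp [Prod.lex_def]
    · simp [Prod.lex_def]
    · simp [Prod.lex_def]
end

def ham_count_dp_alt (n : Int) (S : List Int) : Int :=
  let nn := n.toNat
  let sset := PySem.Set.ofList S
  let full : Nat := (1 <<< nn) - 1
  -- sum(count(full, v) for v in range(n)) sharing one memo left to right
  ((List.range nn).foldl
    (fun (p : Int × PySem.Dict (Nat × Nat) Int) v =>
      let r := hamCountB nn n sset p.2 full v
      (p.1 + r.1, r.2)) (0, PySem.Dict.empty)).1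

-- ===== PRECONDITION & SPEC =====
-- Pre_ excludes n < 0, on which A raises ValueError at '1 << n' (B raises there too).
def Pre_ham_count_dp (n : Int) (S : List Int) : Prop := 0 ≤ n
instance (n : Int) (S : List Int) : Decidable (Pre_ham_count_dp n S) := by
  unfold Pre_ham_count_dp; infer_instance

def pvWitness_ham_count_dp : Int × List Int := (3, [1])

def Spec_ham_count_dp (n : Int) (S : List Int) (out : Int) : Prop := out = ham_count_dp_alt n S
instance (n : Int) (S : List Int) (out : Int) : Decidable (Spec_ham_count_dp n S out) := by
  unfold Spec_ham_count_dp; infer_instance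

-- ===== CLAIM (what is proved, stated in full; the proofs are below) =====
def Claim_equal_ham_count_dp : Prop := ∀ (n : Int) (S : List Int), Dom_ham_count_dp n S → Pre_ham_count_dp n S → Spec_ham_count_dp n S (ham_count_dp n S)

-- ===== LEMMAS AND PROOFS =====

theorem bitCond (a i : Nat) : ((a >>> i) &&& 1 = 1) ↔ a.testBit i = true := by
  rcases Nat.mod_two_eq_zero_or_one (a >>> i) with h | h <;>
    simp [Nat.testBit, Nat.and_comm 1, Nat.and_one_is_mod, h]

theorem oneShift (v : Nat) : (1 : Nat) <<< v = 2 ^ v := by simp [Nat.shiftLeft_eq]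

-- (mask has bit v and removing it gives m)  ↔  (m lacks bit v and mask = m with bit v added)
theorem targetIff (mask v m : Nat) :
    (mask.testBit v = true ∧ mask ^^^ (1 <<< v) = m) ↔
      (m.testBit v = false ∧ mask = m ||| (1 <<< v)) := by
  rw [oneShift]
  constructor
  · rintro ⟨h1, rfl⟩
    refine ⟨by simp [Nat.testBit_xor, h1], ?_⟩
    apply Nat.eq_of_testBit_eq
    intro i
    by_cases hiv : i = v
    · subst hiv; simp [Nat.testBit_or, Nat.testBit_xor, Nat.testBit_two_pow, h1]
    · simp [Nat.testBit_or, Nat.testBit_xor, Nat.testBit_two_pow, hiv, Ne.symm hiv]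
  · rintro ⟨h1, rfl⟩
    refine ⟨by simp [Nat.testBit_or, Nat.testBit_two_pow], ?_⟩
    apply Nat.eq_of_testBit_eq
    intro i
    by_cases hiv : i = v
    · subst hiv; simp [Nat.testBit_or, Nat.testBit_xor, Nat.testBit_two_pow, h1]
    · simp [Nat.testBit_or, Nat.testBit_xor, Nat.testBit_two_pow, hiv, Ne.symm hiv]

-- the common mathematical value: number of paths covering exactly `mask` and ending at v
def hamP (nn : Nat) (n : Int) (sset : PySem.Set Int) (mask v : Nat) : Int :=
  if hv : mask.testBit v = true then
    if mask = 1 <<< v then 1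
    else
      ((List.range nn).map (fun u =>
        if ((mask ^^^ (1 <<< v)) >>> u) &&& 1 = 1 ∧
           sset.contains (PySem.Int.mod ((v : Int) - (u : Int)) n) = true
        then hamP nn n sset (mask ^^^ (1 <<< v)) u else 0)).sum
  else 0
  termination_by mask
  decreasing_by exact hamXorLt mask v hv

-- adjacency row characterization
theorem adjRow_bit (nn : Nat) (n : Int) (sset : PySem.Set Int) (i j : Nat) :
    (hamAdjRow nn n sset i).testBit j =
      (decide (j < nn) && decide (i ≠ j) && sset.contains (PySem.Int.mod ((j : Int) - (i : Int)) n)) := by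
  have key : ∀ (L : List Nat) (a0 : Nat),
      (L.foldl (fun a j => if i ≠ j ∧ sset.contains (PySem.Int.mod ((j : Int) - (i : Int)) n) = true
                           then a ||| (1 <<< j) else a) a0).testBit j =
        (a0.testBit j ||
          (decide (j ∈ L) && decide (i ≠ j) && sset.contains (PySem.Int.mod ((j : Int) - (i : Int)) n))) := by
    intro L
    induction L with
    | nil => simp
    | cons x L ih =>
      intro a0
      rw [List.foldl_cons, ih]
      split_ifs with hc
      · by_cases hx : j = x
        · subst hx
          simp [Nat.testBit_or, oneShift, Nat.testBit_two_pow, hc.1, hc.2]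
          exact Or.inr (by simpa using hc.2)
        · simp [Nat.testBit_or, oneShift, Nat.testBit_two_pow, hx, Ne.symm hx]
      · by_cases hx : j = x
        · subst hx
          have hC : (decide (i ≠ j) &&
              sset.contains (PySem.Int.mod ((j : Int) - (i : Int)) n)) = false := by
            by_cases hi : i = j
            · simp [hi]
            · simp [hi]
              exact fun hm => hc ⟨hi, by simpa using hm⟩
          simp only [Bool.and_eq_false_iff, decide_eq_false_iff_not, not_not,
            PySem.Set.contains_eq_listContains] at hC
          rcases hC with h | h
          · simp [h]
          · have h' : PySem.Int.mod ((j : Int) - (i : Int)) n ∉ sset := by simpa using h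
            simp [h']
        · simp [hx]
  unfold hamAdjRow
  rw [key]
  simp [Nat.zero_testBit]

-- what one inner 'while' pass adds at an arbitrary key
theorem hamPush_getD (cnt : Int) (m : Nat) (cand w : Nat) (dp : PySem.Dict (Nat × Nat) Int)
    (mask v : Nat) :
    (hamPush dp cnt m cand w).getD (mask, v) 0 =
      dp.getD (mask, v) 0 +
        (if w ≤ v ∧ cand.testBit (v - w) = true ∧ mask = m ||| (1 <<< v) then cnt else 0) := by
  induction cand using Nat.strong_induction_on generalizing dp w with
  | _ cand ih =>
    rw [hamPush]
    by_cases hc : cand = 0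
    · simp [hc, Nat.zero_testBit]
    · simp only [hc, dite_false, dif_neg, not_false_iff]
      have hlt : cand >>> 1 < cand := by
        have : cand >>> 1 = cand / 2 := Nat.shiftRight_one cand
        omega
      rw [ih (cand >>> 1) hlt]
      have hb0 : (cand &&& 1 = 1) ↔ cand.testBit 0 = true := by
        have := bitCond cand 0
        simpa [Nat.shiftRight_zero] using this
      by_cases hmk : mask = m ||| (1 <<< v)
      · rcases Nat.lt_trichotomy v w with hvw | hvw | hvw
        · rw [if_neg (by omega : ¬ (w + 1 ≤ v ∧ (cand >>> 1).testBit (v - (w + 1)) = true ∧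
              mask = m ||| 1 <<< v)),
            if_neg (by omega : ¬ (w ≤ v ∧ cand.testBit (v - w) = true ∧ mask = m ||| 1 <<< v))]
          by_cases hb1 : cand &&& 1 = 1
          · rw [if_pos hb1, PySem.Dict.getD_insert,
              if_neg (by simp [Prod.ext_iff]; intro _ h; exact absurd h (by omega))]
          · rw [if_neg hb1]
        · subst hvw
          rw [if_neg (by omega : ¬ (v + 1 ≤ v ∧ (cand >>> 1).testBit (v - (v + 1)) = true ∧
              mask = m ||| 1 <<< v)), add_zero]
          by_cases hb1 : cand &&& 1 = 1
          · rw [if_pos hb1, PySem.Dict.getD_insert, if_pos (by rw [hmk]),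
              if_pos ⟨le_refl v, by simpa [Nat.sub_self] using hb0.mp hb1, hmk⟩, hmk]
          · have hC : ¬ (v ≤ v ∧ cand.testBit (v - v) = true ∧ mask = m ||| 1 <<< v) := by
              rintro ⟨-, hbit, -⟩
              exact hb1 (hb0.mpr (by simpa [Nat.sub_self] using hbit))
            rw [if_neg hb1, if_neg hC, add_zero]
        · have hsb : (cand >>> 1).testBit (v - (w + 1)) = cand.testBit (v - w) := by
            rw [Nat.testBit_shiftRight]
            congr 1
            omega
          have hgd : (if cand &&& 1 = 1
                then dp.insert (m ||| 1 <<< w, w) (dp.getD (m ||| 1 <<< w, w) 0 + cnt)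
                else dp).getD (mask, v) 0 = dp.getD (mask, v) 0 := by
            by_cases hb1 : cand &&& 1 = 1
            · rw [if_pos hb1, PySem.Dict.getD_insert,
                if_neg (by simp [Prod.ext_iff]; intro _ h; exact absurd h (by omega))]
            · rw [if_neg hb1]
          rw [hgd]
          by_cases hcond : cand.testBit (v - w) = true
          · rw [if_pos ⟨by omega, by rw [hsb]; exact hcond, hmk⟩,
              if_pos ⟨by omega, hcond, hmk⟩]
          · rw [if_neg (by rintro ⟨-, hbit, -⟩; rw [hsb] at hbit; exact hcond hbit),
              if_neg (by rintro ⟨-, hbit, -⟩; exact hcond hbit)]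
      · have hC2 : ¬ (w + 1 ≤ v ∧ (cand >>> 1).testBit (v - (w + 1)) = true ∧
            mask = m ||| 1 <<< v) := by rintro ⟨-, -, h⟩; exact hmk h
        have hC1 : ¬ (w ≤ v ∧ cand.testBit (v - w) = true ∧ mask = m ||| 1 <<< v) := by
          rintro ⟨-, -, h⟩; exact hmk h
        rw [if_neg hC2, if_neg hC1, add_zero, add_zero]
        by_cases hb1 : cand &&& 1 = 1
        · rw [if_pos hb1, PySem.Dict.getD_insert, if_neg]
          rintro h
          rw [Prod.mk.injEq] at h
          exact hmk (by rw [h.2]; exact h.1)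
        · rw [if_neg hb1]

-- the initial dict
theorem dp0_getD (nn : Nat) (mask v : Nat) :
    ((List.range nn).foldl (fun d v => d.insert (1 <<< v, v) 1)
        (PySem.Dict.empty : PySem.Dict (Nat × Nat) Int)).getD (mask, v) 0 =
      if v < nn ∧ mask = 1 <<< v then 1 else 0 := by
  have key : ∀ (L : List Nat) (d : PySem.Dict (Nat × Nat) Int),
      (L.foldl (fun d v => d.insert (1 <<< v, v) 1) d).getD (mask, v) 0 =
        if v ∈ L ∧ mask = 1 <<< v then 1 else d.getD (mask, v) 0 := by
    intro L
    induction L with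
    | nil => simp
    | cons a L ih =>
      intro d
      rw [List.foldl_cons, ih]
      by_cases hv : v = a
      · subst hv
        by_cases hmk : mask = 1 <<< v
        · subst hmk
          by_cases hL : v ∈ L <;> simp [hL, PySem.Dict.getD_insert]
        · simp only [hmk, and_false, if_false]
          rw [PySem.Dict.getD_insert, if_neg (by simp [Prod.ext_iff, hmk])]
      · have hne : ¬ ((mask, v) = ((1 <<< a : Nat), a)) := by
          simp only [Prod.mk.injEq, not_and]
          intro _ h
          exact hv h
        rw [PySem.Dict.getD_insert, if_neg hne]
        simp [List.mem_cons, hv]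
  rw [key]
  simp [List.mem_range]

-- Python's bin(m).count('1') characterized for masks below 2^k
theorem bitCount_le (k m : Nat) (h : m < 2 ^ k) :
    PySem.Int.bitCount (m : Int) ≤ k ∧ (k ≤ PySem.Int.bitCount (m : Int) → m = 2 ^ k - 1) := by
  induction k generalizing m with
  | zero =>
    interval_cases m
    simp [PySem.Int.bitCount_zero]
  | succ k ih =>
    by_cases hm : m = 0
    · subst hm
      have : PySem.Int.bitCount ((0 : Nat) : Int) = 0 := by simpa using PySem.Int.bitCount_zero
      rw [this]
      exact ⟨by omega, fun hk => absurd hk (by omega)⟩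
    · have hpos : 0 < m := Nat.pos_of_ne_zero hm
      rw [PySem.Int.bitCount_natCast hpos]
      have hd : m / 2 < 2 ^ k := by
        have := Nat.pow_succ 2 k
        omega
      have hmod := Nat.mod_two_eq_zero_or_one m
      rcases ih (m / 2) hd with ⟨ih1, ih2⟩
      refine ⟨by omega, fun hk => ?_⟩
      have h1 : m % 2 = 1 := by omega
      have h2 : m / 2 = 2 ^ k - 1 := ih2 (by omega)
      have h3 : 0 < 2 ^ k := Nat.two_pow_pos k
      have := Nat.pow_succ 2 k
      omega

-- bookkeeping value of a dp entry while the outer loop stands at mask m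
def hamInit (mask v : Nat) : Int := if mask = 1 <<< v then 1 else 0

def hamContrib (nn : Nat) (n : Int) (sset : PySem.Set Int) (m mask v u : Nat) : Int :=
  if mask.testBit v = true ∧ (mask ^^^ (1 <<< v)) < m ∧
     (mask ^^^ (1 <<< v)).testBit u = true ∧ (hamAdjRow nn n sset u).testBit v = true
  then hamP nn n sset (mask ^^^ (1 <<< v)) u else 0

def hamVal (nn : Nat) (n : Int) (sset : PySem.Set Int) (m mask v : Nat) : Int :=
  if mask < m then hamP nn n sset mask v
  else hamInit mask v + ((List.range nn).map (hamContrib nn n sset m mask v)).sum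

def hamInv (nn : Nat) (n : Int) (sset : PySem.Set Int) (m : Nat)
    (dp : PySem.Dict (Nat × Nat) Int) : Prop :=
  ∀ mask v, v < nn → dp.getD (mask, v) 0 = hamVal nn n sset m mask v

-- a pending entry whose mask the loop has reached holds the final value
theorem pend_processed (nn : Nat) (n : Int) (sset : PySem.Set Int) (m v : Nat) (hv : v < nn) :
    hamInit m v + ((List.range nn).map (hamContrib nn n sset m m v)).sum = hamP nn n sset m v := by
  rw [hamP]
  by_cases htb : m.testBit v = true
  · rw [dif_pos htb]
    by_cases hbase : m = 1 <<< v
    · rw [if_pos hbase]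
      have hrest : m ^^^ (1 <<< v) = 0 := by rw [hbase, Nat.xor_self]
      have hz : ((List.range nn).map (hamContrib nn n sset m m v)).sum = 0 := by
        apply List.sum_eq_zero
        intro x hx
        rcases List.mem_map.mp hx with ⟨u, _, rfl⟩
        unfold hamContrib
        rw [if_neg]
        rintro ⟨-, -, hbit, -⟩
        rw [hrest] at hbit
        simp [Nat.zero_testBit] at hbit
      rw [hz]
      unfold hamInit
      rw [if_pos hbase]
      norm_num
    · rw [if_neg hbase]
      unfold hamInit
      rw [if_neg hbase, zero_add]
      apply congrArg List.sum
      apply List.map_congr_left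
      intro u hu
      unfold hamContrib
      have hrlt : m ^^^ (1 <<< v) < m := hamXorLt m v htb
      have hrv : (m ^^^ (1 <<< v)).testBit v = false := by
        simp [Nat.testBit_xor, oneShift, Nat.testBit_two_pow, htb]
      by_cases hA : (m ^^^ (1 <<< v)).testBit u = true
      · have huv : u ≠ v := fun h => by rw [h, hrv] at hA; exact absurd hA (by simp)
        have hrow : (hamAdjRow nn n sset u).testBit v =
            sset.contains (PySem.Int.mod ((v : Int) - (u : Int)) n) := by
          rw [adjRow_bit]
          simp [hv, huv]
        have hsh : ((m ^^^ (1 <<< v)) >>> u) &&& 1 = 1 := (bitCond _ u).mpr hA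
        by_cases hC : sset.contains (PySem.Int.mod ((v : Int) - (u : Int)) n) = true
        · rw [if_pos ⟨htb, hrlt, hA, by rw [hrow]; exact hC⟩, if_pos ⟨hsh, hC⟩]
        · rw [if_neg (by rintro ⟨-, -, -, hr⟩; rw [hrow] at hr; exact hC hr),
            if_neg (by rintro ⟨-, hr⟩; exact hC hr)]
      · rw [if_neg (by rintro ⟨-, -, hr, -⟩; exact hA hr),
          if_neg (by rintro ⟨hr, -⟩; exact hA ((bitCond _ u).mp hr))]
  · rw [dif_neg htb]
    have hz : ((List.range nn).map (hamContrib nn n sset m m v)).sum = 0 := by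
      apply List.sum_eq_zero
      intro x hx
      rcases List.mem_map.mp hx with ⟨u, _, rfl⟩
      unfold hamContrib
      rw [if_neg]
      rintro ⟨hr, -⟩
      exact htb hr
    rw [hz]
    unfold hamInit
    rw [if_neg]
    · rw [add_zero]
    · intro h
      exact htb (by rw [h, oneShift]; simp [Nat.testBit_two_pow])

-- one pass of the inner 'for v in range(n)' loop, characterized at any key
theorem innerFold_getD (nn : Nat) (n : Int) (sset : PySem.Set Int) (adj : List Nat)
    (m : Nat) (L : List Nat) (dp dp0 : PySem.Dict (Nat × Nat) Int)
    (hdp : ∀ u, dp.getD (m, u) 0 = dp0.getD (m, u) 0) (mask v : Nat) :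
    (L.foldl
      (fun dp v =>
        if m &&& (1 <<< v) = 0 then dp
        else
          let cnt := dp.getD (m, v) 0
          if cnt = 0 then dp
          else hamPush dp cnt m (Nat.ldiff (adj.getD v 0) m) 0) dp).getD (mask, v) 0 =
      dp.getD (mask, v) 0 +
        (L.map (fun u =>
          if m &&& (1 <<< u) ≠ 0 ∧ (Nat.ldiff (adj.getD u 0) m).testBit v = true ∧
             mask = m ||| (1 <<< v)
          then dp0.getD (m, u) 0 else 0)).sum := by
  induction L generalizing dp with
  | nil => simp
  | cons u L ih =>
    -- the step at u touches only keys (m ||| 2^w, w) with w outside m, never a key (m, x)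
    have hstep_pres : ∀ x,
        (if m &&& (1 <<< u) = 0 then dp
         else
           let cnt := dp.getD (m, u) 0
           if cnt = 0 then dp
           else hamPush dp cnt m (Nat.ldiff (adj.getD u 0) m) 0).getD (m, x) 0 =
          dp.getD (m, x) 0 := by
      intro x
      by_cases h1 : m &&& (1 <<< u) = 0
      · rw [if_pos h1]
      · rw [if_neg h1]
        by_cases h2 : dp.getD (m, u) 0 = 0
        · simp only [h2, if_pos]
        · simp only [h2, if_neg, if_false]
          rw [hamPush_getD]
          rw [if_neg, add_zero]
          rintro ⟨-, hbit, hm⟩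
          have hmx : m.testBit x = true := by
            conv_lhs => rw [hm]
            simp [Nat.testBit_or, oneShift, Nat.testBit_two_pow]
          rw [Nat.testBit_ldiff] at hbit
          simp [hmx] at hbit
    have hdp' : ∀ x,
        (if m &&& (1 <<< u) = 0 then dp
         else
           let cnt := dp.getD (m, u) 0
           if cnt = 0 then dp
           else hamPush dp cnt m (Nat.ldiff (adj.getD u 0) m) 0).getD (m, x) 0 =
          dp0.getD (m, x) 0 := fun x => (hstep_pres x).trans (hdp x)
    rw [List.foldl_cons, ih _ hdp']
    have hhead :
        (if m &&& (1 <<< u) = 0 then dp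
         else
           let cnt := dp.getD (m, u) 0
           if cnt = 0 then dp
           else hamPush dp cnt m (Nat.ldiff (adj.getD u 0) m) 0).getD (mask, v) 0 =
          dp.getD (mask, v) 0 +
            (if m &&& (1 <<< u) ≠ 0 ∧ (Nat.ldiff (adj.getD u 0) m).testBit v = true ∧
                mask = m ||| (1 <<< v)
             then dp0.getD (m, u) 0 else 0) := by
      by_cases h1 : m &&& (1 <<< u) = 0
      · rw [if_pos h1, if_neg (by rintro ⟨hne, -⟩; exact hne h1), add_zero]
      · rw [if_neg h1]
        by_cases h2 : dp.getD (m, u) 0 = 0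
        · simp only [h2, if_pos]
          have hval : dp0.getD (m, u) 0 = 0 := (hdp u).symm.trans h2
          rw [hval]
          simp
        · simp only [h2, if_neg, if_false]
          rw [hamPush_getD, ← hdp u]
          by_cases h3 : (Nat.ldiff (adj.getD u 0) m).testBit v = true ∧ mask = m ||| (1 <<< v)
          · rw [if_pos ⟨Nat.zero_le v, by simpa using h3.1, h3.2⟩, if_pos ⟨h1, h3.1, h3.2⟩]
          · rw [if_neg, if_neg]
            · rintro ⟨hne, hb, hm⟩
              exact h3 ⟨hb, hm⟩
            · rintro ⟨-, hb, hm⟩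
              exact h3 ⟨by simpa using hb, hm⟩
    rw [hhead, List.map_cons, List.sum_cons]
    ring

-- one step of the outer loop preserves the invariant
theorem step_inv (nn : Nat) (n : Int) (sset : PySem.Set Int) (hn : 0 ≤ n) (hnn : nn = n.toNat)
    (m : Nat) (hm1 : 1 ≤ m) (hm2 : m ≤ 2 ^ nn - 1) (dp : PySem.Dict (Nat × Nat) Int)
    (hinv : hamInv nn n sset m dp) :
    hamInv nn n sset (m + 1) (hamStep nn n ((List.range nn).map (hamAdjRow nn n sset)) dp m) := by
  have hN : ((nn : Nat) : Int) = n := by rw [hnn]; exact Int.toNat_of_nonneg hn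
  have horbit : ∀ (a b : Nat), (a ||| 1 <<< b).testBit b = true := by
    intro a b
    simp [Nat.testBit_or, oneShift, Nat.testBit_two_pow]
  have hread : ∀ u, u < nn → dp.getD (m, u) 0 = hamP nn n sset m u := by
    intro u hu
    rw [hinv m u hu]
    unfold hamVal
    rw [if_neg (lt_irrefl m)]
    exact pend_processed nn n sset m u hu
  intro mask v hv
  unfold hamStep
  by_cases hpc : n ≤ (PySem.Int.bitCount (m : Int) : Int)
  · rw [if_pos hpc]
    have hmlt : m < 2 ^ nn := by have := Nat.two_pow_pos nn; omega
    have hge : nn ≤ PySem.Int.bitCount (m : Int) := by exact_mod_cast hN ▸ hpc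
    have hfull : m = 2 ^ nn - 1 := (bitCount_le nn m hmlt).2 hge
    have hmv : m.testBit v = true := by
      rw [hfull, Nat.testBit_two_pow_sub_one]
      simp [hv]
    rw [hinv mask v hv]
    unfold hamVal
    rcases Nat.lt_trichotomy mask m with hc | hc | hc
    · rw [if_pos hc, if_pos (by omega)]
    · subst hc
      rw [if_neg (lt_irrefl mask), if_pos (by omega)]
      exact pend_processed nn n sset mask v hv
    · rw [if_neg (by omega), if_neg (by omega)]
      congr 1
      apply congrArg List.sum
      apply List.map_congr_left
      intro u _
      unfold hamContrib
      by_cases hcnd : mask.testBit v = true ∧ (mask ^^^ (1 <<< v)) < m ∧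
          (mask ^^^ (1 <<< v)).testBit u = true ∧ (hamAdjRow nn n sset u).testBit v = true
      · rw [if_pos hcnd, if_pos ⟨hcnd.1, by omega, hcnd.2.2⟩]
      · rw [if_neg hcnd, if_neg]
        rintro ⟨h1, h2, h3, h4⟩
        apply hcnd
        refine ⟨h1, ?_, h3, h4⟩
        rcases Nat.lt_or_ge (mask ^^^ (1 <<< v)) m with h | h
        · exact h
        · have heq : mask ^^^ (1 <<< v) = m := by omega
          have := ((targetIff mask v m).mp ⟨h1, heq⟩).1
          rw [hmv] at this
          exact absurd this (by simp)
  · rw [if_neg hpc]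
    rw [innerFold_getD nn n sset ((List.range nn).map (hamAdjRow nn n sset)) m (List.range nn)
        dp dp (fun _ => rfl) mask v, hinv mask v hv]
    have hadj : ∀ u, u < nn →
        (((List.range nn).map (hamAdjRow nn n sset)).getD u 0) = hamAdjRow nn n sset u := by
      intro u hu
      rw [List.getD_eq_getElem?_getD, List.getElem?_map]
      simp [List.getElem?_range, hu]
    -- rewrite the added terms through the invariant
    have hterm : (List.range nn).map (fun u =>
          if m &&& (1 <<< u) ≠ 0 ∧
             (Nat.ldiff (((List.range nn).map (hamAdjRow nn n sset)).getD u 0) m).testBit v = true ∧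
             mask = m ||| (1 <<< v)
          then dp.getD (m, u) 0 else 0) =
        (List.range nn).map (fun u =>
          if m.testBit u = true ∧ (hamAdjRow nn n sset u).testBit v = true ∧
             m.testBit v = false ∧ mask = m ||| (1 <<< v)
          then hamP nn n sset m u else 0) := by
      apply List.map_congr_left
      intro u hu
      rw [List.mem_range] at hu
      rw [hadj u hu]
      have hand : (m &&& (1 <<< u) ≠ 0) ↔ m.testBit u = true := by
        rw [oneShift, Nat.and_two_pow]
        rcases Bool.eq_false_or_eq_true (m.testBit u) with h | h
        · simp [h]
        · simp [h, (Nat.two_pow_pos u).ne']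
      have hld : (Nat.ldiff (hamAdjRow nn n sset u) m).testBit v =
          ((hamAdjRow nn n sset u).testBit v && !(m.testBit v)) := Nat.testBit_ldiff _ _ v
      by_cases hC : m.testBit u = true ∧ (hamAdjRow nn n sset u).testBit v = true ∧
          m.testBit v = false ∧ mask = m ||| (1 <<< v)
      · rw [if_pos ⟨hand.mpr hC.1, by rw [hld, hC.2.1, hC.2.2.1]; rfl, hC.2.2.2⟩, if_pos hC,
          hread u hu]
      · rw [if_neg, if_neg hC]
        rintro ⟨h1, h2, h3⟩
        rw [hld] at h2
        apply hC
        refine ⟨hand.mp h1, ?_, ?_, h3⟩ <;>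
          rcases Bool.eq_false_or_eq_true ((hamAdjRow nn n sset u).testBit v) with h | h <;>
          rcases Bool.eq_false_or_eq_true (m.testBit v) with h' | h' <;>
          simp [h, h'] at h2 ⊢
    rw [hterm]
    -- now compare the bookkeeping values
    unfold hamVal
    rcases Nat.lt_trichotomy mask m with hc | hc | hc
    · rw [if_pos hc, if_pos (by omega)]
      have hz : ((List.range nn).map (fun u =>
          if m.testBit u = true ∧ (hamAdjRow nn n sset u).testBit v = true ∧
             m.testBit v = false ∧ mask = m ||| (1 <<< v)
          then hamP nn n sset m u else 0)).sum = 0 := by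
        apply List.sum_eq_zero
        intro x hx
        rcases List.mem_map.mp hx with ⟨u, _, rfl⟩
        rw [if_neg]
        rintro ⟨-, -, -, hmk⟩
        have : m ≤ mask := hmk ▸ Nat.left_le_or
        omega
      rw [hz, add_zero]
    · subst hc
      rw [if_neg (lt_irrefl mask), if_pos (by omega)]
      have hz : ((List.range nn).map (fun u =>
          if mask.testBit u = true ∧ (hamAdjRow nn n sset u).testBit v = true ∧
             mask.testBit v = false ∧ mask = mask ||| (1 <<< v)
          then hamP nn n sset mask u else 0)).sum = 0 := by
        apply List.sum_eq_zero
        intro x hx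
        rcases List.mem_map.mp hx with ⟨u, _, rfl⟩
        rw [if_neg]
        rintro ⟨-, -, hbv, hmk⟩
        rw [hmk, horbit] at hbv
        exact absurd hbv (by simp)
      rw [hz, add_zero]
      exact pend_processed nn n sset mask v hv
    · rw [if_neg (by omega), if_neg (by omega)]
      have hpoint : ∀ u, u ∈ List.range nn →
          hamContrib nn n sset (m + 1) mask v u =
            hamContrib nn n sset m mask v u +
              (if m.testBit u = true ∧ (hamAdjRow nn n sset u).testBit v = true ∧
                  m.testBit v = false ∧ mask = m ||| (1 <<< v)
               then hamP nn n sset m u else 0) := by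
        intro u _
        unfold hamContrib
        by_cases h1 : mask.testBit v = true
        · by_cases h2 : mask ^^^ (1 <<< v) = m
          · rcases (targetIff mask v m).mp ⟨h1, h2⟩ with ⟨hmv, hmask⟩
            rw [h2]
            by_cases h3 : m.testBit u = true ∧ (hamAdjRow nn n sset u).testBit v = true
            · rw [if_pos ⟨h1, by omega, h3.1, h3.2⟩, if_neg (by rintro ⟨-, hlt, -⟩; omega),
                if_pos ⟨h3.1, h3.2, hmv, hmask⟩, zero_add]
            · rw [if_neg (by rintro ⟨-, -, hb, hr⟩; exact h3 ⟨hb, hr⟩),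
                if_neg (by rintro ⟨-, hlt, -⟩; omega),
                if_neg (by rintro ⟨hb, hr, -⟩; exact h3 ⟨hb, hr⟩), zero_add]
          · have hA : ¬ (m.testBit u = true ∧ (hamAdjRow nn n sset u).testBit v = true ∧
                m.testBit v = false ∧ mask = m ||| (1 <<< v)) := by
              rintro ⟨-, -, hmv, hmask⟩
              exact h2 ((targetIff mask v m).mpr ⟨hmv, hmask⟩).2
            rw [if_neg hA, add_zero]
            by_cases h4 : (mask ^^^ (1 <<< v)) < m ∧ (mask ^^^ (1 <<< v)).testBit u = true ∧
                (hamAdjRow nn n sset u).testBit v = true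
            · rw [if_pos ⟨h1, by omega, h4.2⟩, if_pos ⟨h1, h4⟩]
            · rw [if_neg, if_neg]
              · rintro ⟨-, hlt, hr⟩
                exact h4 ⟨hlt, hr⟩
              · rintro ⟨-, hlt, hr⟩
                refine h4 ⟨?_, hr⟩
                rcases Nat.lt_or_ge (mask ^^^ (1 <<< v)) m with h | h
                · exact h
                · exact absurd (by omega : mask ^^^ (1 <<< v) = m) h2
        · rw [if_neg (by rintro ⟨hb, -⟩; exact h1 hb), if_neg (by rintro ⟨hb, -⟩; exact h1 hb),
            if_neg, zero_add]
          rintro ⟨-, -, -, hmask⟩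
          exact h1 (by rw [hmask]; exact horbit m v)
      rw [List.map_congr_left hpoint]
      rw [PySem.List.sum_map_add_int]
      ring

-- A's value is the sum of the final path counts
theorem portA_eq (n : Int) (S : List Int) (hn : 0 ≤ n) :
    ham_count_dp n S =
      ((List.range n.toNat).map
        (fun v => hamP n.toNat n (PySem.Set.ofList S) ((1 <<< n.toNat) - 1) v)).sum := by
  have hinv0 : hamInv n.toNat n (PySem.Set.ofList S) 1
      ((List.range n.toNat).foldl (fun d v => d.insert (1 <<< v, v) 1) PySem.Dict.empty) := by
    intro mask v hv
    rw [dp0_getD]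
    unfold hamVal
    rcases Nat.lt_or_ge mask 1 with h | h
    · rw [if_pos h]
      have hmask : mask = 0 := by omega
      subst hmask
      rw [hamP, dif_neg (by simp [Nat.zero_testBit]), if_neg]
      rintro ⟨-, h0⟩
      rw [oneShift] at h0
      exact absurd h0.symm (Nat.two_pow_pos v).ne'
    · rw [if_neg (show ¬ mask < 1 by omega)]
      have hz : ((List.range n.toNat).map
          (hamContrib n.toNat n (PySem.Set.ofList S) 1 mask v)).sum = 0 := by
        apply List.sum_eq_zero
        intro x hx
        rcases List.mem_map.mp hx with ⟨u, _, rfl⟩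
        unfold hamContrib
        rw [if_neg]
        rintro ⟨-, hlt, hbit, -⟩
        have : mask ^^^ (1 <<< v) = 0 := by omega
        rw [this] at hbit
        simp [Nat.zero_testBit] at hbit
      rw [hz, add_zero]
      unfold hamInit
      simp [hv]
  have key : ∀ k, k ≤ 2 ^ n.toNat - 1 →
      hamInv n.toNat n (PySem.Set.ofList S) (1 + k)
        ((List.range' 1 k).foldl
          (hamStep n.toNat n ((List.range n.toNat).map (hamAdjRow n.toNat n (PySem.Set.ofList S))))
          ((List.range n.toNat).foldl (fun d v => d.insert (1 <<< v, v) 1) PySem.Dict.empty)) := by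
    intro k
    induction k with
    | zero => intro _; simpa using hinv0
    | succ k ih =>
      intro hk
      rw [List.range'_1_concat, List.foldl_append, List.foldl_cons, List.foldl_nil]
      exact step_inv n.toNat n (PySem.Set.ofList S) hn rfl (1 + k) (by omega) (by omega) _
        (ih (by omega))
  have hfin := key (2 ^ n.toNat - 1) (le_refl _)
  have h2 : 1 + (2 ^ n.toNat - 1) = 2 ^ n.toNat := by have := Nat.two_pow_pos n.toNat; omega
  rw [h2] at hfin
  rw [ham_count_dp.eq_def]
  dsimp only
  apply congrArg List.sum
  apply List.map_congr_left
  intro v hvm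
  rw [List.mem_range] at hvm
  rw [hfin _ v hvm]
  unfold hamVal
  rw [if_pos]
  rw [oneShift]
  have := Nat.two_pow_pos n.toNat
  omega

-- ---- B side ----

def hamValid (nn : Nat) (n : Int) (sset : PySem.Set Int)
    (memo : PySem.Dict (Nat × Nat) Int) : Prop :=
  ∀ p t, memo.get? p = some t → t = hamP nn n sset p.1 p.2

theorem hamCountB_eq (nn : Nat) (n : Int) (sset : PySem.Set Int) (mask : Nat) :
    ∀ v memo, hamValid nn n sset memo →
      (hamCountB nn n sset memo mask v).1 = hamP nn n sset mask v ∧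
        hamValid nn n sset (hamCountB nn n sset memo mask v).2 := by
  induction mask using Nat.strong_induction_on with
  | _ mask ih =>
    intro v memo hval
    rw [hamCountB]
    by_cases hbase : mask = 1 <<< v
    · rw [if_pos hbase]
      refine ⟨?_, hval⟩
      rw [hamP, dif_pos (by rw [hbase, oneShift]; simp [Nat.testBit_two_pow]), if_pos hbase]
    · rw [if_neg hbase]
      cases hget : memo.get? (mask, v) with
      | some t =>
        exact ⟨(hval _ _ hget).symm ▸ rfl, hval⟩
      | none =>
        by_cases hv : mask.testBit v = true
        · rw [dif_pos hv]
          have hlist : ∀ (us : List Nat) (acc : Int) (memo : PySem.Dict (Nat × Nat) Int),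
              hamValid nn n sset memo →
                (hamCountBList nn n sset memo (mask ^^^ (1 <<< v)) v us acc).1 =
                  acc + (us.map (fun u =>
                    if ((mask ^^^ (1 <<< v)) >>> u) &&& 1 = 1 ∧
                       sset.contains (PySem.Int.mod ((v : Int) - (u : Int)) n) = true
                    then hamP nn n sset (mask ^^^ (1 <<< v)) u else 0)).sum ∧
                hamValid nn n sset (hamCountBList nn n sset memo (mask ^^^ (1 <<< v)) v us acc).2 := by
            intro us
            induction us with
            | nil =>
              intro acc memo hval
              rw [hamCountBList]
              exact ⟨by simp, hval⟩
            | cons u us ihus =>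
              intro acc memo hval
              rw [hamCountBList]
              by_cases hcnd : ((mask ^^^ (1 <<< v)) >>> u) &&& 1 = 1 ∧
                  sset.contains (PySem.Int.mod ((v : Int) - (u : Int)) n) = true
              · rw [if_pos hcnd]
                have hrec := ih (mask ^^^ (1 <<< v)) (hamXorLt mask v hv) u memo hval
                rcases ihus (acc + (hamCountB nn n sset memo (mask ^^^ (1 <<< v)) u).1) _ hrec.2
                  with ⟨e1, e2⟩
                refine ⟨?_, e2⟩
                rw [e1, hrec.1, List.map_cons, List.sum_cons, if_pos hcnd]
                ring
              · rw [if_neg hcnd]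
                rcases ihus acc memo hval with ⟨e1, e2⟩
                refine ⟨?_, e2⟩
                rw [e1, List.map_cons, List.sum_cons, if_neg hcnd]
                ring
          rcases hlist (List.range nn) 0 memo hval with ⟨e1, e2⟩
          constructor
          · show (hamCountBList nn n sset memo (mask ^^^ (1 <<< v)) v (List.range nn) 0).1 = _
            rw [e1, hamP, dif_pos hv, if_neg hbase, zero_add]
          · intro p t hget'
            by_cases hp : p = (mask, v)
            · subst hp
              rw [PySem.Dict.get?_insert_self] at hget'
              cases hget'
              rw [e1, hamP, dif_pos hv, if_neg hbase, zero_add]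
            · rw [PySem.Dict.get?_insert_of_ne _ _ hp] at hget'
              exact e2 _ _ hget'
        · rw [dif_neg hv]
          refine ⟨?_, hval⟩
          rw [hamP, dif_neg hv]

theorem portB_eq (n : Int) (S : List Int) (hn : 0 ≤ n) :
    ham_count_dp_alt n S =
      ((List.range n.toNat).map
        (fun v => hamP n.toNat n (PySem.Set.ofList S) ((1 <<< n.toNat) - 1) v)).sum := by
  have key : ∀ (L : List Nat) (acc : Int) (memo : PySem.Dict (Nat × Nat) Int),
      hamValid n.toNat n (PySem.Set.ofList S) memo →
        (L.foldl
          (fun (p : Int × PySem.Dict (Nat × Nat) Int) v =>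
            let r := hamCountB n.toNat n (PySem.Set.ofList S) p.2 ((1 <<< n.toNat) - 1) v
            (p.1 + r.1, r.2)) (acc, memo)).1 =
          acc + (L.map
            (fun v => hamP n.toNat n (PySem.Set.ofList S) ((1 <<< n.toNat) - 1) v)).sum := by
    intro L
    induction L with
    | nil => intro acc memo _; simp
    | cons x L ihl =>
      intro acc memo hval
      rw [List.foldl_cons]
      have hrec := hamCountB_eq n.toNat n (PySem.Set.ofList S) ((1 <<< n.toNat) - 1) x memo hval
      rw [ihl _ _ hrec.2, hrec.1, List.map_cons, List.sum_cons]
      ring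
  have hempty : hamValid n.toNat n (PySem.Set.ofList S) PySem.Dict.empty := by
    intro p t hget
    rw [PySem.Dict.get?_empty] at hget
    cases hget
  rw [ham_count_dp_alt.eq_def]
  dsimp only
  rw [key (List.range n.toNat) 0 PySem.Dict.empty hempty, zero_add]

-- ===== VERDICT (by name: the statement is the Claim_ definition above) =====
theorem ham_count_dp_spec : Claim_equal_ham_count_dp := by
  intro n S _ hpre
  unfold Spec_ham_count_dp
  rw [portA_eq n S hpre, portB_eq n S hpre]
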